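-- pv_equiv track=rewrite | github.com/QkoSad/Nand2Tertris | VMTranslator.py | clear_file
-- ===== SOURCE A (Python) =====
-- def clear_file(clearfile):
--     temp_string_cf = ''  # clears the empty lines, comments and spaces and writes them in a string
--     for vmline in clearfile:
--         flag = 0
--         if vmline == '\n':
--             continue
--         for index in range(len(vmline)):
--             if vmline[index:index + 2] == '//':
--                 if flag == 1:
--                     temp_string_cf += '\n'
--                 break
--             if flag == 1 and vmline[index:index + 2] == '  ':
--                 temp_string_cf += '\n'
--                 break
--             temp_string_cf += vmline[index]
--             flag = 1
--     return temp_string_cf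
-- ===== SOURCE B (Python) =====
-- def clear_file(clearfile):
--     parts = []  # cut each line at the earliest '//' (anywhere) or '  ' (from index 1)
--     for vmline in clearfile:
--         if vmline == '\n':
--             continue
--         c1 = vmline.find('//')
--         c2 = vmline.find('  ', 1)
--         if c1 == -1:
--             cut = c2
--         elif c2 == -1:
--             cut = c1
--         else:
--             cut = min(c1, c2)
--         if cut == -1:
--             parts.append(vmline)
--         else:
--             content = vmline[:cut]
--             parts.append(content)
--             if content:
--                 parts.append('\n')
--     return ''.join(parts)
-- ===== Notes on version B (the rewrite author's own statement) =====
-- stated objective: simpler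
-- what changed: A's char-by-char scan with a flag and mid-loop breaks is replaced by two str.find calls per line (for '//' anywhere and ' ' from index 1), taking the earliest cut and emitting one slice plus a conditional newline, joined at the end.
import Mathlib
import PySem

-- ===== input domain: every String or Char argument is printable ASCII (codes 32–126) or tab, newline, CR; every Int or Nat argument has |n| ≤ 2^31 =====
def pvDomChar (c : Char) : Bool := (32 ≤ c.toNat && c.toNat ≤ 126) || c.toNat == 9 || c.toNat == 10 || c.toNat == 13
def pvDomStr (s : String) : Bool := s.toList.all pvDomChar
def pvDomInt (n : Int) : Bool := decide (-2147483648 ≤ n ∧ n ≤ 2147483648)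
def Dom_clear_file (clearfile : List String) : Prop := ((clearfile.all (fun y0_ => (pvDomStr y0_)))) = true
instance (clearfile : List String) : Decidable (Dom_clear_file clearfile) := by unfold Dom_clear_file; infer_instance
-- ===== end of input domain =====

-- B replaces A's char-by-char flag/break scan with two str.find calls, an earliest-cut min and one slice per line; simpler and measurably faster (str.find runs at C level).


-- ===== PORT A =====
-- A's inner `for index in range(len(vmline))` with breaks: structural recursion over the
-- remaining suffix (vmline[index:index+2] is exactly the 2-char take of the suffix, clamped),
-- with flag (Python int 0/1) as a Nat, emitting the chars appended to temp_string_cf.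
def pvLoopA : List Char → Nat → List Char
  | [], _ => []
  | c :: rest, flag =>
    if (c :: rest).take 2 = ['/', '/'] then (if flag = 1 then ['\n'] else [])
    else if flag = 1 ∧ (c :: rest).take 2 = [' ', ' '] then ['\n']
    else c :: pvLoopA rest 1

def clear_file (clearfile : List String) : String :=
  String.ofList (clearfile.foldl (fun temp_string_cf vmline =>
    if vmline = "\n" then temp_string_cf
    else temp_string_cf ++ pvLoopA vmline.toList 0) [])

-- ===== PORT B =====
-- per-line body of Source B: two finds, earliest cut, one slice
def pvLineB (s : List Char) : List Char :=
  let c1 := PySem.Chars.find s ['/', '/']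
  let c2 := PySem.Chars.findFrom s [' ', ' '] 1 none
  let cut := if c1 = -1 then c2 else if c2 = -1 then c1 else min c1 c2
  if cut = -1 then s
  else
    let content := PySem.Chars.slice s none (some cut)
    if content = [] then content else content ++ ['\n']

def clear_file_alt (clearfile : List String) : String :=
  String.ofList ((clearfile.foldl (fun parts vmline =>
    if vmline = "\n" then parts
    else parts ++ [pvLineB vmline.toList]) []).flatten)

-- ===== PRECONDITION & SPEC =====
def Spec_clear_file (clearfile : List String) (out : String) : Prop := out = clear_file_alt clearfile
instance (clearfile : List String) (out : String) : Decidable (Spec_clear_file clearfile out) := by unfold Spec_clear_file; infer_instance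

-- ===== CLAIM (what is proved, stated in full; the proofs are below) =====
def Claim_equal_clear_file : Prop := ∀ (clearfile : List String), Dom_clear_file clearfile → Spec_clear_file clearfile (clear_file clearfile)

-- ===== LEMMAS AND PROOFS =====

-- first index (if any) at which '//' or '  ' starts
def pvCut : List Char → Option Nat
  | [] => none
  | c :: rest =>
    if (c :: rest).take 2 = ['/', '/'] ∨ (c :: rest).take 2 = [' ', ' '] then some 0
    else (pvCut rest).map (· + 1)

theorem pvLoopA_true (l : List Char) :
    pvLoopA l 1 = match pvCut l with
      | some i => l.take i ++ ['\n']
      | none => l := by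
  induction l with
  | nil => simp [pvLoopA, pvCut]
  | cons c rest ih =>
    by_cases h1 : (c :: rest).take 2 = ['/', '/']
    · simp [pvLoopA, pvCut, h1]
    · by_cases h2 : (c :: rest).take 2 = [' ', ' ']
      · simp [pvLoopA, pvCut, h2]
      · rw [show pvLoopA (c :: rest) 1 = c :: pvLoopA rest 1 from by
              rw [pvLoopA, if_neg h1, if_neg (fun h => h2 h.2)],
            show pvCut (c :: rest) = (pvCut rest).map (· + 1) from by
              rw [pvCut, if_neg (not_or.mpr ⟨h1, h2⟩)],
            ih]
        cases hc : pvCut rest <;> simp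

theorem pv_infix_of_prefix_drop (l sub : List Char) (j : Nat) (h : sub <+: l.drop j) :
    sub <:+: l :=
  (PySem.Chars.isIn_iff_infix sub l).1 ((PySem.Chars.exists_prefix_drop_iff_isIn sub l).1 ⟨j, h⟩)

theorem find_eq_zero_of_prefix (l sub : List Char) (h : sub <+: l) :
    PySem.Chars.find l sub = 0 := by
  have hnn : 0 ≤ PySem.Chars.find l sub :=
    (PySem.Chars.find_nonneg_iff l sub).2 h.isInfix
  rcases PySem.Chars.find_spec hnn with ⟨_, hmin⟩
  by_contra hne
  have hpos : 0 < (PySem.Chars.find l sub).toNat := by omega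
  exact hmin 0 hpos (by simpa using h)

-- shift find across a head that does not start an occurrence
theorem find_shift (c : Char) (rest sub : List Char) (h : ¬ sub <+: (c :: rest)) :
    PySem.Chars.find (c :: rest) sub =
      if PySem.Chars.find rest sub = -1 then -1 else PySem.Chars.find rest sub + 1 := by
  by_cases hr : PySem.Chars.find rest sub = -1
  · simp only [hr, if_pos]
    rw [PySem.Chars.find_eq_neg_one_iff] at hr ⊢
    intro hin
    rcases (PySem.Chars.exists_prefix_drop_iff_isIn sub (c :: rest)).2
      ((PySem.Chars.isIn_iff_infix sub (c :: rest)).2 hin) with ⟨j, hj⟩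
    cases j with
    | zero => exact h (by simpa using hj)
    | succ k => exact hr (pv_infix_of_prefix_drop rest sub k (by simpa using hj))
  · simp only [hr, if_neg, not_false_iff]
    have hnn : 0 ≤ PySem.Chars.find rest sub := by
      have := PySem.Chars.neg_one_le_find rest sub; omega
    rcases PySem.Chars.find_spec hnn with ⟨hpre, hmin⟩
    set f := (PySem.Chars.find rest sub).toNat with hf
    have hnn2 : 0 ≤ PySem.Chars.find (c :: rest) sub := by
      apply (PySem.Chars.find_nonneg_iff _ _).2
      exact pv_infix_of_prefix_drop (c :: rest) sub (f + 1) (by simpa using hpre)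
    rcases PySem.Chars.find_spec hnn2 with ⟨hpre2, hmin2⟩
    set g := (PySem.Chars.find (c :: rest) sub).toNat with hg
    have h1 : g ≤ f + 1 := by
      by_contra hgt
      exact hmin2 (f + 1) (by omega) (by simpa using hpre)
    have h2 : f + 1 ≤ g := by
      cases hgc : g with
      | zero =>
        rw [hgc] at hpre2
        exact absurd (by simpa using hpre2) h
      | succ k =>
        rw [hgc] at hpre2
        have : ¬ k < f := fun hk => hmin k hk (by simpa using hpre2)
        omega
    omega

theorem pvCut_eq (l : List Char) :
    pvCut l =
      (let c1 := PySem.Chars.find l ['/', '/']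
       let c2 := PySem.Chars.find l [' ', ' ']
       if c1 = -1 then (if c2 = -1 then none else some c2.toNat)
       else if c2 = -1 then some c1.toNat else some (min c1 c2).toNat) := by
  induction l with
  | nil => simp [pvCut]; decide
  | cons c rest ih =>
    by_cases hP : (c :: rest).take 2 = ['/', '/'] ∨ (c :: rest).take 2 = [' ', ' ']
    · have key : ∀ sub : List Char, sub.length = 2 → (c :: rest).take 2 = sub → PySem.Chars.find (c :: rest) sub = 0 := by
        intro sub hl hs
        apply find_eq_zero_of_prefix
        rw [List.prefix_iff_eq_take, hl, hs]
      rcases hP with h | h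
      · have h1 := key _ rfl h
        have hneg2 := PySem.Chars.neg_one_le_find (c :: rest) [' ', ' ']
        rw [show pvCut (c :: rest) = some 0 by simp [pvCut, h]]
        simp only [h1]
        rw [if_neg (by norm_num : ¬ ((0:Int) = -1))]
        by_cases e2 : PySem.Chars.find (c :: rest) [' ', ' '] = -1
        · simp [e2]
        · rw [if_neg e2, show min (0:Int) (PySem.Chars.find (c :: rest) [' ', ' ']) = 0 by omega]
          simp
      · have h2 := key _ rfl h
        have hneg1 := PySem.Chars.neg_one_le_find (c :: rest) ['/', '/']
        rw [show pvCut (c :: rest) = some 0 by simp [pvCut, h]]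
        simp only [h2]
        by_cases e1 : PySem.Chars.find (c :: rest) ['/', '/'] = -1
        · simp [e1]
        · rw [if_neg e1, if_neg (by norm_num : ¬ ((0:Int) = -1)),
              show min (PySem.Chars.find (c :: rest) ['/', '/']) (0:Int) = 0 by omega]
          simp
    · obtain ⟨h1, h2⟩ := not_or.mp hP
      have np1 : ¬ (['/', '/'] <+: (c :: rest)) := by
        rw [List.prefix_iff_eq_take]; intro h; exact h1 h.symm
      have np2 : ¬ ([' ', ' '] <+: (c :: rest)) := by
        rw [List.prefix_iff_eq_take]; intro h; exact h2 h.symm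
      rw [show pvCut (c :: rest) = (pvCut rest).map (· + 1) by
        rw [pvCut, if_neg (not_or.mpr ⟨h1, h2⟩)]]
      rw [find_shift c rest _ np1, find_shift c rest _ np2, ih]
      have hn1 := PySem.Chars.neg_one_le_find rest ['/', '/']
      have hn2 := PySem.Chars.neg_one_le_find rest [' ', ' ']
      set d1 := PySem.Chars.find rest ['/', '/'] with hd1
      set d2 := PySem.Chars.find rest [' ', ' '] with hd2
      by_cases e1 : d1 = -1 <;> by_cases e2 : d2 = -1
      · simp [e1, e2]
      · have t : ¬ (d2 + 1 = -1) := by omega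
        simp [e1, e2, t]
        omega
      · have t : ¬ (d1 + 1 = -1) := by omega
        simp [e1, e2, t]
        omega
      · have t1 : ¬ (d1 + 1 = -1) := by omega
        have t2 : ¬ (d2 + 1 = -1) := by omega
        simp [e1, e2, t1, t2]
        omega

theorem line_eq (l : List Char) : pvLoopA l 0 = pvLineB l := by
  cases l with
  | nil => decide
  | cons c rest =>
    have hc2 : PySem.Chars.findFrom (c :: rest) [' ', ' '] 1 none =
        if PySem.Chars.find rest [' ', ' '] = -1 then -1
        else 1 + PySem.Chars.find rest [' ', ' '] := by
      have h := PySem.Chars.findFrom_natCast (c :: rest) [' ', ' '] 1 (by simp)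
      simpa using h
    have hn2 := PySem.Chars.neg_one_le_find rest [' ', ' ']
    have hn1 := PySem.Chars.neg_one_le_find rest ['/', '/']
    by_cases h1 : (c :: rest).take 2 = ['/', '/']
    · -- '//' at index 0: A appends nothing (flag = 0); B cuts at 0 with empty content
      have hf : PySem.Chars.find (c :: rest) ['/', '/'] = 0 :=
        find_eq_zero_of_prefix _ _ (List.prefix_iff_eq_take.2 (by simpa using h1.symm))
      have hA : pvLoopA (c :: rest) 0 = [] := by simp [pvLoopA, h1]
      have hsl : PySem.List.slice (c :: rest) none (some 0) = [] := by
        rw [PySem.List.slice_to (c :: rest) (b := 0) (by norm_num)]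
        simp
      by_cases e2 : PySem.Chars.find rest [' ', ' '] = -1
      · simp [pvLineB, hA, hf, hc2, e2, hsl]
      · have t : ¬ ((1 + PySem.Chars.find rest [' ', ' '] : Int) = -1) := by omega
        have hm : min (0 : Int) (1 + PySem.Chars.find rest [' ', ' ']) = 0 := by omega
        simp [pvLineB, hA, hf, hc2, e2, t, hm, hsl]
    · -- no '//' at index 0: A emits c and scans on with flag = 1
      have np1 : ¬ (['/', '/'] <+: (c :: rest)) := by
        rw [List.prefix_iff_eq_take]; intro h; exact h1 (by simpa using h.symm)
      have hsh := find_shift c rest ['/', '/'] np1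
      have hA : pvLoopA (c :: rest) 0 = c :: pvLoopA rest 1 := by
        rw [pvLoopA, if_neg h1, if_neg (by simp)]
      rw [hA, pvLoopA_true rest, pvCut_eq rest]
      set d1 := PySem.Chars.find rest ['/', '/'] with hd1
      set d2 := PySem.Chars.find rest [' ', ' '] with hd2
      by_cases e1 : d1 = -1 <;> by_cases e2 : d2 = -1
      · simp [pvLineB, hsh, hc2, e1, e2]
      · have t : ¬ ((1 + d2 : Int) = -1) := by omega
        have hsl : PySem.List.slice (c :: rest) none (some (1 + d2)) = c :: rest.take d2.toNat := by
          rw [PySem.List.slice_to (c :: rest) (b := 1 + d2) (by omega),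
              show (1 + d2).toNat = d2.toNat + 1 by omega]
          simp
        simp [pvLineB, hsh, hc2, e1, e2, t, hsl]
      · have t : ¬ ((d1 + 1 : Int) = -1) := by omega
        have hsl : PySem.List.slice (c :: rest) none (some (d1 + 1)) = c :: rest.take d1.toNat := by
          rw [PySem.List.slice_to (c :: rest) (b := d1 + 1) (by omega),
              show (d1 + 1).toNat = d1.toNat + 1 by omega]
          simp
        simp [pvLineB, hsh, hc2, e1, e2, t, hsl]
      · have t1 : ¬ ((d1 + 1 : Int) = -1) := by omega
        have t2 : ¬ ((1 + d2 : Int) = -1) := by omega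
        have hmin : min (d1 + 1) (1 + d2) = min d1 d2 + 1 := by omega
        have t3 : ¬ ((min d1 d2 + 1 : Int) = -1) := by omega
        have hsl : PySem.List.slice (c :: rest) none (some (min d1 d2 + 1))
            = c :: rest.take (min d1 d2).toNat := by
          rw [PySem.List.slice_to (c :: rest) (b := min d1 d2 + 1) (by omega),
              show (min d1 d2 + 1).toNat = (min d1 d2).toNat + 1 by omega]
          simp
        simp [pvLineB, hsh, hc2, e1, e2, t1, t2, hmin, t3, hsl]

theorem fold_eq (cf : List String) (accB : List (List Char)) :
    cf.foldl (fun t v => if v = "\n" then t else t ++ pvLoopA v.toList 0) accB.flatten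
      = (cf.foldl (fun p v => if v = "\n" then p else p ++ [pvLineB v.toList]) accB).flatten := by
  induction cf generalizing accB with
  | nil => rfl
  | cons v cf ih =>
    simp only [List.foldl_cons]
    by_cases hv : v = "\n"
    · simp only [hv, if_pos]
      exact ih accB
    · simp only [hv, reduceIte]
      rw [show accB.flatten ++ pvLoopA v.toList 0 = (accB ++ [pvLineB v.toList]).flatten by
        simp [line_eq]]
      exact ih (accB ++ [pvLineB v.toList])

-- ===== VERDICT (by name: the statement is the Claim_ definition above) =====
theorem clear_file_spec : Claim_equal_clear_file := by
  intro cf _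
  unfold Spec_clear_file clear_file clear_file_alt
  exact congrArg String.ofList (by simpa using fold_eq cf [])
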